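-- pv_equiv track=rewrite | github.com/stavetskiy/rektorTest | answer2.py | count_adjacent_pairs
-- ===== SOURCE A (Python) =====
-- def count_adjacent_pairs(text):
--     pairs_count = {}
--     for i in range(len(text)-1):
--         pair = text[i:i+2]
--         if pair in pairs_count:
--             pairs_count[pair] += 1
--         else:
--             pairs_count[pair] = 1
--     return pairs_count
-- ===== SOURCE B (Python) =====
-- def count_adjacent_pairs(text):
--     # Partition-based grouping: repeatedly take the first remaining pair,
--     # strip every occurrence of it, and record how many were removed.
--     pairs = [text[i:i+2] for i in range(len(text) - 1)]
--     result = {}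
--     while pairs:
--         p = pairs[0]
--         rest = [q for q in pairs if q != p]
--         result[p] = len(pairs) - len(rest)
--         pairs = rest
--     return result
-- ===== Notes on version B (the rewrite author's own statement) =====
-- stated objective: alternative
-- what changed: Replaces the single counter-maintaining dict scan with a partition algorithm: a while loop that repeatedly takes the first remaining pair, filters out all its occurrences, and records the count as the length difference, so no membership tests or increments are performed.
import Mathlib
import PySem

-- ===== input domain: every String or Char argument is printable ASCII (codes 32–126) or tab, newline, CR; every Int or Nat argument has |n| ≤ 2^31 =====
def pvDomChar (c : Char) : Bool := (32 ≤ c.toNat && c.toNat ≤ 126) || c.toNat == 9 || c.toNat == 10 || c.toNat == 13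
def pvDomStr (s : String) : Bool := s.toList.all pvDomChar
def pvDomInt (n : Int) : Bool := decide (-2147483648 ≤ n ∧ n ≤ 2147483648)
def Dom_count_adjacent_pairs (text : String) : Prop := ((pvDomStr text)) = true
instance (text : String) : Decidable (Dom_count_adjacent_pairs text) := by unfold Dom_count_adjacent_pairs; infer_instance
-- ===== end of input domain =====

-- B replaces A's counter-maintaining dict scan with a partition loop that repeatedly
-- strips all occurrences of the first remaining pair (alternative decomposition; not faster).


-- ===== PORT A =====
def count_adjacent_pairs (text : String) : List (String × Int) :=
  let pairs_count :=
    (PySem.List.pyRange 0 (PySem.Str.len text - 1) 1).foldl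
      (fun d i =>
        let pair := PySem.Str.slice text (some i) (some (i + 2))
        if d.contains pair then d.insert pair (d.getD pair 0 + 1)
        else d.insert pair 1)
      PySem.Dict.empty
  pairs_count.items

-- ===== PORT B =====
-- the 'while pairs:' loop of Source B
def cap_loop (pairs : List String) (result : PySem.Dict String Int) : PySem.Dict String Int :=
  match pairs with
  | [] => result
  | p :: ps =>
      let rest := (p :: ps).filter (fun q => q != p)
      cap_loop rest (result.insert p (((p :: ps).length : Int) - (rest.length : Int)))
termination_by pairs.length
decreasing_by
  simp only [List.filter_cons, bne_self_eq_false, Bool.false_eq_true, if_false]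
  exact Nat.lt_succ_of_le (List.length_filter_le _ _)

def count_adjacent_pairs_alt (text : String) : List (String × Int) :=
  let pairs :=
    (PySem.List.pyRange 0 (PySem.Str.len text - 1) 1).map
      (fun i => PySem.Str.slice text (some i) (some (i + 2)))
  (cap_loop pairs PySem.Dict.empty).items

-- ===== PRECONDITION & SPEC =====
def Spec_count_adjacent_pairs (text : String) (out : List (String × Int)) : Prop := out = count_adjacent_pairs_alt text
instance (text : String) (out : List (String × Int)) : Decidable (Spec_count_adjacent_pairs text out) := by unfold Spec_count_adjacent_pairs; infer_instance

-- ===== CLAIM (what is proved, stated in full; the proofs are below) =====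
def Claim_equal_count_adjacent_pairs : Prop := ∀ (text : String), Dom_count_adjacent_pairs text → Spec_count_adjacent_pairs text (count_adjacent_pairs text)

-- ===== LEMMAS AND PROOFS =====

-- A's loop body is exactly the counter step.
lemma stepA_eq :
    (fun (d : PySem.Dict String Int) p =>
        if d.contains p then d.insert p (d.getD p 0 + 1) else d.insert p 1)
    = fun d p => d.insert p (d.getD p 0 + 1) := by
  funext d p
  by_cases h : d.contains p = true
  · simp [h]
  · simp [h, PySem.Dict.getD_of_not_contains d 0 (by simpa using h)]

-- Adding elements all equal to something already present is a no-op on a Set fold.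
lemma foldl_add_filter_ne (p : String) :
    ∀ (t : List String) (s : PySem.Set String), p ∈ s →
      t.foldl PySem.Set.add s = (t.filter (fun q => q != p)).foldl PySem.Set.add s := by
  intro t
  induction t with
  | nil => intro s _; rfl
  | cons q t ih =>
    intro s hp
    by_cases hq : q = p
    · subst hq
      have h : PySem.Set.add s q = s := PySem.Set.add_of_mem hp
      rw [List.filter_cons, if_neg (by simp), List.foldl_cons, h, ih s hp]
    · have hmem : p ∈ PySem.Set.add s q := by
        unfold PySem.Set.add; split <;> simp [hp]
      rw [List.filter_cons, if_pos (by simp [bne, hq])]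
      rw [List.foldl_cons, List.foldl_cons, ih _ hmem]

-- Folding Set.add over elements all ≠ x commutes with a cons at the front.
lemma foldl_add_cons (x : String) :
    ∀ (t : List String) (s : PySem.Set String), (∀ q ∈ t, q ≠ x) →
      t.foldl PySem.Set.add (x :: s) = x :: t.foldl PySem.Set.add s := by
  intro t
  induction t with
  | nil => intro s _; rfl
  | cons q t ih =>
    intro s hne
    have hq : q ≠ x := hne q (List.mem_cons_self)
    have : PySem.Set.add (x :: s) q = x :: PySem.Set.add s q := by
      unfold PySem.Set.add PySem.Set.contains
      simp [hq]
      split <;> simp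
    rw [List.foldl_cons, this, ih _ (fun r hr => hne r (List.mem_cons_of_mem _ hr)), List.foldl_cons]

-- First-occurrence dedup of p :: t: p, then dedup of t with all p's removed.
lemma ofList_cons_filter (p : String) (t : List String) :
    PySem.Set.ofList (p :: t) = p :: PySem.Set.ofList (t.filter (fun q => q != p)) := by
  have h1 : PySem.Set.ofList (p :: t) = t.foldl PySem.Set.add [p] := by
    rw [PySem.Set.ofList_eq_foldl]; rfl
  rw [h1, foldl_add_filter_ne p t [p] (by simp)]
  rw [foldl_add_cons p _ ([] : PySem.Set String)
      (by intro q hq; simpa using (List.of_mem_filter hq))]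
  rw [PySem.Set.ofList_eq_foldl]

-- Invariant of B's while loop: on fresh keys it appends the grouped counts.
lemma cap_loop_items :
    ∀ (n : Nat) (ps : List String) (d : PySem.Dict String Int), ps.length ≤ n →
      (∀ k ∈ ps, d.contains k = false) →
      (cap_loop ps d).items
        = d.items ++ (PySem.Set.ofList ps).map (fun k => (k, (ps.count k : Int))) := by
  intro n
  induction n with
  | zero =>
    intro ps d hlen _
    have : ps = [] := List.eq_nil_of_length_eq_zero (Nat.le_zero.mp hlen)
    subst this; rw [cap_loop.eq_def]; simp
  | succ n ih =>
    intro ps d hlen hfresh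
    match ps with
    | [] => rw [cap_loop.eq_def]; simp
    | p :: t =>
      rw [cap_loop.eq_def]
      simp only []
      set rest := (p :: t).filter (fun q => q != p) with hrest
      have hrest_t : rest = t.filter (fun q => q != p) := by
        simp [hrest, List.filter]
      have hrestlen : rest.length ≤ n := by
        rw [hrest_t]
        exact Nat.le_of_lt_succ (Nat.lt_of_le_of_lt (List.length_filter_le _ _)
          (Nat.lt_succ_of_le (Nat.le_of_succ_le_succ hlen)))
      have hcount : (((p :: t).length : Int) - (rest.length : Int))
          = ((p :: t).count p : Int) := by
        have hsplit : (p :: t).length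
            = (p :: t).countP (fun q => q == p) + (p :: t).countP (fun q => q != p) := by
          rw [List.length_eq_countP_add_countP (l := p :: t) (p := fun q => q == p)]
          congr 1
          apply List.countP_congr
          intro q _
          simp [bne]
        have hlenrest : rest.length = (p :: t).countP (fun q => q != p) := by
          rw [hrest]; exact List.countP_eq_length_filter.symm
        have hc : (p :: t).count p = (p :: t).countP (fun q => q == p) := rfl
        rw [hlenrest, hc]
        omega
      have hpf : d.contains p = false := hfresh p List.mem_cons_self
      have hfresh' : ∀ k ∈ rest,
          (d.insert p (((p :: t).length : Int) - (rest.length : Int))).contains k = false := by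
        intro k hk
        have hkne : k ≠ p := by simpa using (List.of_mem_filter hk)
        have hkt : k ∈ t := by
          have := List.mem_of_mem_filter hk
          rcases this with _ | h
          · exact absurd rfl hkne
          · assumption
        have hkd : d.contains k = false := hfresh k (List.mem_cons_of_mem _ hkt)
        rw [PySem.Dict.contains_eq_decide_mem_keys] at hkd ⊢
        simp only [decide_eq_false_iff_not] at hkd ⊢
        intro hk
        simp only [PySem.Dict.keys, List.mem_map] at hk
        obtain ⟨q, hq, hq1⟩ := hk
        rcases (PySem.Dict.mem_items_insert _ _ _ _).mp hq with h | ⟨h, _⟩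
        · exact hkne (by rw [h] at hq1; exact hq1.symm)
        · exact hkd (by simp only [PySem.Dict.keys, List.mem_map]; exact ⟨q, h, hq1⟩)
      rw [ih rest _ hrestlen hfresh']
      rw [PySem.Dict.items_insert, hpf]
      simp only [Bool.false_eq_true, if_false]
      rw [ofList_cons_filter p t, ← hrest_t]
      simp only [List.map_cons, List.append_assoc, List.cons_append, List.nil_append]
      congr 2
      · rw [hcount]
      · apply List.map_congr_left
        intro k hk
        have hkrest : k ∈ rest := by
          have := (PySem.Set.mem_ofList rest k).mp hk
          exact this
        have hkne : k ≠ p := by simpa using (List.of_mem_filter hkrest)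
        congr 1
        rw [hrest_t]
        rw [List.count_filter (by simp [bne, hkne])]
        simp [List.count_cons]
        exact fun h => hkne h.symm

-- Both ports compute the grouped counts of the same pairs list.
lemma ports_agree (ps : List String) :
    (ps.foldl
        (fun d p =>
          if d.contains p then d.insert p (d.getD p 0 + 1) else d.insert p 1)
        PySem.Dict.empty).items
    = (cap_loop ps PySem.Dict.empty).items := by
  have hA : (ps.foldl
      (fun d p => if d.contains p then d.insert p (d.getD p 0 + 1) else d.insert p 1)
      PySem.Dict.empty).items
      = (PySem.Set.ofList ps).map (fun k => (k, (ps.count k : Int))) := by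
    rw [stepA_eq, PySem.Dict.foldl_insert_getD_add_one_eq_counter, PySem.Dict.items_counter]
  have hempty : (PySem.Dict.empty : PySem.Dict String Int).items = [] := rfl
  have hB : (cap_loop ps PySem.Dict.empty).items
      = (PySem.Set.ofList ps).map (fun k => (k, (ps.count k : Int))) := by
    rw [cap_loop_items ps.length ps PySem.Dict.empty le_rfl
        (by intro k _; exact PySem.Dict.contains_empty k)]
    rw [hempty, List.nil_append]
  rw [hA, hB]

-- ===== VERDICT (by name: the statement is the Claim_ definition above) =====
theorem count_adjacent_pairs_spec : Claim_equal_count_adjacent_pairs := by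
  intro text _
  unfold Spec_count_adjacent_pairs
  simp only [count_adjacent_pairs, count_adjacent_pairs_alt]
  have h := ports_agree
    (List.map (fun i => PySem.Str.slice text (some i) (some (i + 2)))
      (PySem.List.pyRange 0 (PySem.Str.len text - 1)))
  rw [List.foldl_map] at h
  exact h
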